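-- pv_equiv track=rewrite | github.com/DWinnter/tokenizers_clique_partition | length.py | calculate_ngrams
-- ===== SOURCE A (Python) =====
-- def calculate_ngrams(args):
--     n, vocab_chunk = args
--     result = {}
--     for word, freq in vocab_chunk.items():
--         symbols = word.split()
--         for i in range(len(symbols) - n + 1):
--             ngram = tuple(symbols[i:i+n])
--             if ngram not in result:
--                 result[ngram] = {'freq': 0, 'score': 0}
--             result[ngram]['freq'] += freq
--             result[ngram]['score'] += n * freq
--     return result
-- ===== SOURCE B (Python) =====
-- def calculate_ngrams(args):
--     n, vocab_chunk = args
--     freqs = {}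
--     for word, freq in vocab_chunk.items():
--         symbols = word.split()
--         window = tuple(symbols[:n])
--         if len(window) == n:
--             freqs[window] = freqs.get(window, 0) + freq
--             for s in symbols[n:]:
--                 window = window[1:] + (s,)
--                 freqs[window] = freqs.get(window, 0) + freq
--     return {ng: {'freq': f, 'score': n * f} for ng, f in freqs.items()}
-- ===== Notes on version B (the rewrite author's own statement) =====
-- stated objective: alternative
-- what changed: B replaces A's per-index slicing loop by an incrementally maintained sliding window (drop the head symbol, append the next) that accumulates only per-ngram frequencies, and derives {'freq': f, 'score': n*f} in a separate post-loop pass.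
-- outside the precondition, e.g. on calculate_ngrams((-1, {'a': 1})): A returns {(): {'freq': 3, 'score': -3}}, B returns {}
import Mathlib
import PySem

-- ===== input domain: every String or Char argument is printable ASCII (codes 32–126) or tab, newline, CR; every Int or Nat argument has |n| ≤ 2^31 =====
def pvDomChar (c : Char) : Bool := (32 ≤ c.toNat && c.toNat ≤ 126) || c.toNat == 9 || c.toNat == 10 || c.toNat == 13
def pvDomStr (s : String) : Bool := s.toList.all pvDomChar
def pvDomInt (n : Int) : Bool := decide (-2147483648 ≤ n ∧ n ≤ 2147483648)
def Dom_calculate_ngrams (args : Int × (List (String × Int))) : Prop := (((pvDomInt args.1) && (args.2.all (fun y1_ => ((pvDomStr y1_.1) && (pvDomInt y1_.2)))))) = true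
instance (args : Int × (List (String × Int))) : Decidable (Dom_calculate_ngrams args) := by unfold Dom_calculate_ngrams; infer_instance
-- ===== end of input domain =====

-- B counts with an incrementally maintained sliding window (drop head, append next symbol)
-- instead of A's per-index slices, and derives {'freq': f, 'score': n*f} in a post-loop pass.

-- ===== PORT A =====
def calculate_ngrams (args : Int × (List (String × Int))) : List (List String × List (String × Int)) :=
  let n := args.1
  let vocab := PySem.Dict.ofList args.2
  let result : PySem.Dict (List String) (PySem.Dict String Int) :=
    vocab.items.foldl (fun result wf =>
      let symbols := PySem.Str.split₀ wf.1
      (PySem.List.pyRange 0 ((symbols.length : Int) - n + 1) 1).foldl (fun result i =>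
        let ngram := PySem.List.slice symbols (some i) (some (i + n))
        let result := if result.contains ngram then result
                      else result.insert ngram (PySem.Dict.ofList [("freq", (0 : Int)), ("score", 0)])
        let result := result.modify ngram PySem.Dict.empty (fun inner => inner.modify "freq" 0 (· + wf.2))
        result.modify ngram PySem.Dict.empty (fun inner => inner.modify "score" 0 (· + n * wf.2))
      ) result
    ) PySem.Dict.empty
  result.items.map (fun p => (p.1, p.2.items))

-- ===== PORT B =====
def calculate_ngrams_alt (args : Int × (List (String × Int))) : List (List String × List (String × Int)) :=
  let n := args.1
  let vocab := PySem.Dict.ofList args.2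
  let freqs : PySem.Dict (List String) Int :=
    vocab.items.foldl (fun freqs wf =>
      let symbols := PySem.Str.split₀ wf.1
      let window := PySem.List.slice symbols none (some n)
      if (window.length : Int) = n then
        let freqs1 := freqs.insert window (freqs.getD window 0 + wf.2)
        ((PySem.List.slice symbols (some n) none).foldl
          (fun (st : PySem.Dict (List String) Int × List String) s =>
            let w := st.2.tail ++ [s]
            (st.1.insert w (st.1.getD w 0 + wf.2), w))
          (freqs1, window)).1
      else freqs
    ) PySem.Dict.empty
  let out : PySem.Dict (List String) (PySem.Dict String Int) :=
    freqs.items.foldl (fun out p =>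
      out.insert p.1 (PySem.Dict.ofList [("freq", p.2), ("score", n * p.2)])) PySem.Dict.empty
  out.items.map (fun p => (p.1, p.2.items))

-- ===== PRECONDITION & SPEC =====
-- Pre_ restricts to n ≥ 1, the natural domain of an n-gram size; for n ≤ 0 A still returns, but its
-- values are accidental degenerate "ngrams" produced by empty or negative-bound slices, and B's
-- sliding window does the natural thing (no ngrams for n < 0, per-symbol windows for n = 0).
def Pre_calculate_ngrams (args : Int × (List (String × Int))) : Prop := 1 ≤ args.1
instance (args : Int × (List (String × Int))) : Decidable (Pre_calculate_ngrams args) := by unfold Pre_calculate_ngrams; infer_instance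
def pvWitness_calculate_ngrams : (Int × (List (String × Int))) := ((1 : Int), [("a b", (2 : Int))])

def Spec_calculate_ngrams (args : Int × (List (String × Int))) (out : List (List String × List (String × Int))) : Prop := out = calculate_ngrams_alt args
instance (args : Int × (List (String × Int))) (out : List (List String × List (String × Int))) : Decidable (Spec_calculate_ngrams args out) := by unfold Spec_calculate_ngrams; infer_instance

-- ===== CLAIM (what is proved, stated in full; the proofs are below) =====
def Claim_equal_calculate_ngrams : Prop := ∀ (args : Int × (List (String × Int))), Dom_calculate_ngrams args → Pre_calculate_ngrams args → Spec_calculate_ngrams args (calculate_ngrams args)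

-- ===== LEMMAS AND PROOFS =====

-- the inner dict A maintains for a key with accumulated frequency f is {'freq': f, 'score': n*f}
def pvVal (n f : Int) : PySem.Dict String Int := PySem.Dict.ofList [("freq", f), ("score", n * f)]

-- the simulation map: B's frequency dict determines A's dict of inner dicts, key for key in order
def pvG (n : Int) (d : PySem.Dict (List String) Int) : PySem.Dict (List String) (PySem.Dict String Int) :=
  PySem.Dict.mk (d.items.map (fun p => (p.1, pvVal n p.2)))

-- "bump ngram by f": the single frequency update both counting loops reduce to
def pvBump (f : Int) (d : PySem.Dict (List String) Int) (ng : List String) : PySem.Dict (List String) Int :=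
  d.insert ng (d.getD ng 0 + f)

-- A's per-occurrence update (the body of A's inner loop)
def pvAstep (n f : Int) (symbols : List String)
    (result : PySem.Dict (List String) (PySem.Dict String Int)) (i : Int) :
    PySem.Dict (List String) (PySem.Dict String Int) :=
  let ngram := PySem.List.slice symbols (some i) (some (i + n))
  let result := if result.contains ngram then result
                else result.insert ngram (PySem.Dict.ofList [("freq", (0 : Int)), ("score", 0)])
  let result := result.modify ngram PySem.Dict.empty (fun inner => inner.modify "freq" 0 (· + f))
  result.modify ngram PySem.Dict.empty (fun inner => inner.modify "score" 0 (· + n * f))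

-- the per-word bodies of the two outer loops
def pvAword (n : Int) (result : PySem.Dict (List String) (PySem.Dict String Int))
    (wf : String × Int) : PySem.Dict (List String) (PySem.Dict String Int) :=
  let symbols := PySem.Str.split₀ wf.1
  (PySem.List.pyRange 0 ((symbols.length : Int) - n + 1) 1).foldl (pvAstep n wf.2 symbols) result

def pvBword (n : Int) (freqs : PySem.Dict (List String) Int)
    (wf : String × Int) : PySem.Dict (List String) Int :=
  let symbols := PySem.Str.split₀ wf.1
  let window := PySem.List.slice symbols none (some n)
  if (window.length : Int) = n then
    let freqs1 := freqs.insert window (freqs.getD window 0 + wf.2)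
    ((PySem.List.slice symbols (some n) none).foldl
      (fun (st : PySem.Dict (List String) Int × List String) s =>
        let w := st.2.tail ++ [s]
        (st.1.insert w (st.1.getD w 0 + wf.2), w))
      (freqs1, window)).1
  else freqs

-- the ngram streams the two counting loops bump over
def pvNgramsA (n : Int) (symbols : List String) : List (List String) :=
  (PySem.List.pyRange 0 ((symbols.length : Int) - n + 1) 1).map
    (fun i => PySem.List.slice symbols (some i) (some (i + n)))

def pvWinSeq : List String → List String → List (List String)
  | w, [] => [w]
  | w, s :: t => w :: pvWinSeq (w.tail ++ [s]) t

def pvNgramsB (n : Int) (symbols : List String) : List (List String) :=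
  if ((PySem.List.slice symbols none (some n)).length : Int) = n
  then pvWinSeq (PySem.List.slice symbols none (some n)) (PySem.List.slice symbols (some n) none)
  else []

theorem pvVal_def (n f : Int) : pvVal n f = PySem.Dict.mk [("freq", f), ("score", n * f)] := rfl

theorem pv_contains_pvG (n : Int) (d : PySem.Dict (List String) Int) (k : List String) :
    (pvG n d).contains k = d.contains k := by
  show (d.items.map (fun p => (p.1, pvVal n p.2))).any (fun p => p.1 == k) = d.items.any (fun p => p.1 == k)
  rw [List.any_map]
  rfl

theorem pv_get?_pvG (n : Int) (d : PySem.Dict (List String) Int) (k : List String) :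
    (pvG n d).get? k = (d.get? k).map (fun f => pvVal n f) := by
  show Option.map (fun x => x.2)
      (List.find? (fun p => p.1 == k) (d.items.map (fun p => (p.1, pvVal n p.2))))
    = Option.map (fun f => pvVal n f) (Option.map (fun x => x.2) (List.find? (fun p => p.1 == k) d.items))
  rw [List.find?_map]
  simp only [Option.map_map]
  rfl

theorem pv_insert_pvG (n v : Int) (k : List String) (d : PySem.Dict (List String) Int) :
    (pvG n d).insert k (pvVal n v) = pvG n (d.insert k v) := by
  apply PySem.Dict.ext
  rw [PySem.Dict.items_insert, pv_contains_pvG]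
  show _ = (d.insert k v).items.map (fun p => (p.1, pvVal n p.2))
  rw [PySem.Dict.items_insert]
  cases hc : d.contains k with
  | true =>
      simp only [if_true, pvG, List.map_map]
      refine List.map_congr_left (fun p _ => ?_)
      by_cases h : p.1 = k <;> simp [h]
  | false =>
      simp [pvG]

theorem pv_step_k (n f : Int) (k : List String) (d : PySem.Dict (List String) Int) :
    ((if (pvG n d).contains k then pvG n d
      else (pvG n d).insert k (PySem.Dict.ofList [("freq", (0 : Int)), ("score", 0)])).modify k
        PySem.Dict.empty (fun inner => inner.modify "freq" 0 (· + f))).modify k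
        PySem.Dict.empty (fun inner => inner.modify "score" 0 (· + n * f))
    = pvG n (pvBump f d k) := by
  have hmod : ∀ (r : PySem.Dict (List String) (PySem.Dict String Int)) (v : PySem.Dict String Int)
      (g : PySem.Dict String Int → PySem.Dict String Int),
      (r.insert k v).modify k PySem.Dict.empty g = r.insert k (g v) := by
    intro r v g
    show (r.insert k v).insert k (g ((r.insert k v).getD k PySem.Dict.empty)) = _
    rw [PySem.Dict.getD_insert_self, PySem.Dict.insert_insert_self]
  show _ = pvG n (d.insert k (d.getD k 0 + f))
  cases hc : d.contains k with
  | false =>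
      rw [pv_contains_pvG, hc]
      simp only [Bool.false_eq_true, if_false]
      rw [hmod, hmod, PySem.Dict.getD_of_not_contains d 0 hc, ← pv_insert_pvG n (0 + f) k d]
      have hval : (PySem.Dict.mk [("freq", 0 + f), ("score", 0 + n * f)] : PySem.Dict String Int)
          = pvVal n (0 + f) := by
        rw [pvVal_def]
        simp
      exact congrArg ((pvG n d).insert k) hval
  | true =>
      rw [pv_contains_pvG, hc]
      simp only [if_true]
      have hsome : (d.get? k).isSome = true := by
        rw [← PySem.Dict.contains_eq_isSome_get?]; exact hc
      obtain ⟨F, hF⟩ := Option.isSome_iff_exists.mp hsome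
      have hgd : d.getD k 0 = F := by rw [PySem.Dict.getD_eq_get?_getD, hF]; rfl
      have hr : (pvG n d).getD k PySem.Dict.empty = pvVal n F := by
        rw [PySem.Dict.getD_eq_get?_getD, pv_get?_pvG, hF]; rfl
      rw [show (pvG n d).modify k PySem.Dict.empty (fun inner => inner.modify "freq" 0 (· + f))
            = (pvG n d).insert k ((fun inner => PySem.Dict.modify inner "freq" 0 (· + f))
                ((pvG n d).getD k PySem.Dict.empty)) from rfl, hr]
      rw [hmod, hgd, ← pv_insert_pvG n (F + f) k d]
      have hval : (PySem.Dict.mk [("freq", F + f), ("score", n * F + n * f)] : PySem.Dict String Int)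
          = pvVal n (F + f) := by
        rw [pvVal_def]
        simp [mul_add]
      exact congrArg ((pvG n d).insert k) hval

-- A's inner loop, seen through pvG, is a fold of pvBump over the slice stream pvNgramsA
theorem pv_inner (n f : Int) (symbols : List String) (l : List Int)
    (d : PySem.Dict (List String) Int) :
    l.foldl (pvAstep n f symbols) (pvG n d)
      = pvG n ((l.map (fun i => PySem.List.slice symbols (some i) (some (i + n)))).foldl (pvBump f) d) := by
  induction l generalizing d with
  | nil => rfl
  | cons i t ih =>
      rw [List.foldl_cons, List.map_cons, List.foldl_cons]
      rw [show pvAstep n f symbols (pvG n d) i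
            = pvG n (pvBump f d (PySem.List.slice symbols (some i) (some (i + n)))) from
          pv_step_k n f (PySem.List.slice symbols (some i) (some (i + n))) d]
      exact ih _

-- B's window loop is a fold of pvBump over the window stream pvWinSeq
theorem pv_fold_state (f : Int) (rest : List String) :
    ∀ (w : List String) (d : PySem.Dict (List String) Int),
    ((rest.foldl
        (fun (st : PySem.Dict (List String) Int × List String) s =>
          let w' := st.2.tail ++ [s]
          (st.1.insert w' (st.1.getD w' 0 + f), w'))
        (pvBump f d w, w)).1
      = (pvWinSeq w rest).foldl (pvBump f) d) := by
  induction rest with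
  | nil => intro w d; rfl
  | cons s t ih =>
      intro w d
      rw [List.foldl_cons]
      exact ih (w.tail ++ [s]) (pvBump f d w)

-- the window sequence from (take m, drop m) lists exactly the m-grams at each position
theorem pv_winSeq_spec : ∀ (xs : List String) (m : Nat), 1 ≤ m → m ≤ xs.length →
    pvWinSeq (xs.take m) (xs.drop m)
      = (List.range (xs.length - m + 1)).map (fun i => (xs.drop i).take m) := by
  intro xs
  induction xs with
  | nil => intro m h1 h2; exact absurd h2 (by simp; omega)
  | cons a t ih =>
      intro m h1 h2
      obtain ⟨m', rfl⟩ : ∃ m', m = m' + 1 := ⟨m - 1, by omega⟩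
      by_cases hm : m' + 1 = t.length + 1
      · have hl : (a :: t).length ≤ m' + 1 := by simp; omega
        rw [List.drop_of_length_le hl, List.take_of_length_le hl]
        rw [show (a :: t).length - (m' + 1) + 1 = 1 by omega]
        simp [pvWinSeq, List.take_of_length_le hl]
      · have hm' : m' + 1 ≤ t.length := by simp at h2; omega
        have hdrop2 : t.drop m' = t[m'] :: t.drop (m' + 1) :=
          List.drop_eq_getElem_cons (by omega)
        rw [show (a :: t).drop (m' + 1) = t.drop m' from rfl, hdrop2]
        simp only [List.take_succ_cons, pvWinSeq, List.tail_cons]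
        have htake : t.take m' ++ [t[m']] = t.take (m' + 1) := by
          rw [List.take_add_one, List.getElem?_eq_getElem (by omega)]
          rfl
        rw [htake, ih (m' + 1) h1 hm']
        conv_rhs =>
          rw [show (a :: t).length - (m' + 1) + 1 = (t.length - (m' + 1) + 1) + 1 by
                simp; omega,
              List.range_succ_eq_map, List.map_cons, List.map_map]
        congr 1

-- for n ≥ 1 the two ngram streams coincide
theorem pv_ngrams_eq (n : Int) (hn : 1 ≤ n) (symbols : List String) :
    pvNgramsA n symbols = pvNgramsB n symbols := by
  obtain ⟨m, rfl⟩ : ∃ m : Nat, n = (m : Int) := ⟨n.toNat, (Int.toNat_of_nonneg (by omega)).symm⟩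
  have hm : 1 ≤ m := by exact_mod_cast hn
  unfold pvNgramsA pvNgramsB
  rw [PySem.List.slice_to_natCast, PySem.List.slice_from_natCast]
  by_cases hml : m ≤ symbols.length
  · have hcond : (((symbols.take m).length : Int) = (m : Int)) := by
      rw [List.length_take]; push_cast; omega
    rw [if_pos hcond]
    rw [show ((symbols.length : Int) - (m : Int) + 1) = ((symbols.length - m + 1 : Nat) : Int) by push_cast; omega]
    rw [PySem.List.pyRange_one, List.map_map]
    rw [show (((symbols.length - m + 1 : Nat) : Int) - 0).toNat = symbols.length - m + 1 by omega]
    rw [pv_winSeq_spec symbols m hm hml]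
    refine List.map_congr_left (fun k hk => ?_)
    show PySem.List.slice symbols (some ((0 : Int) + (k : Int))) (some ((0 : Int) + (k : Int) + (m : Int))) = _
    rw [show ((0 : Int) + (k : Int)) = ((k : Nat) : Int) by omega]
    exact PySem.List.slice_natCast_add symbols k m
  · have hcond : ¬ (((symbols.take m).length : Int) = (m : Int)) := by
      rw [List.length_take]; push_cast; omega
    rw [if_neg hcond]
    rw [PySem.List.pyRange_one_eq_nil (by omega)]
    rfl

-- B's per-word body is the fold of pvBump over pvNgramsB
theorem pv_bword_eq (n : Int) (wf : String × Int) (d : PySem.Dict (List String) Int) :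
    pvBword n d wf = (pvNgramsB n (PySem.Str.split₀ wf.1)).foldl (pvBump wf.2) d := by
  unfold pvBword pvNgramsB
  by_cases h : (((PySem.List.slice (PySem.Str.split₀ wf.1) none (some n)).length : Int) = n)
  · rw [if_pos h, if_pos h]
    exact pv_fold_state wf.2 (PySem.List.slice (PySem.Str.split₀ wf.1) (some n) none)
      (PySem.List.slice (PySem.Str.split₀ wf.1) none (some n)) d
  · rw [if_neg h, if_neg h]
    rfl

-- per-word simulation: A's word body on pvG d is pvG of B's word body on d
theorem pv_word (n : Int) (hn : 1 ≤ n) (wf : String × Int) (d : PySem.Dict (List String) Int) :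
    pvAword n (pvG n d) wf = pvG n (pvBword n d wf) := by
  unfold pvAword
  rw [pv_inner n wf.2 (PySem.Str.split₀ wf.1) _ d]
  rw [pv_bword_eq n wf d]
  rw [show ((PySem.List.pyRange 0 (((PySem.Str.split₀ wf.1).length : Int) - n + 1) 1).map
        (fun i => PySem.List.slice (PySem.Str.split₀ wf.1) (some i) (some (i + n))))
      = pvNgramsA n (PySem.Str.split₀ wf.1) from rfl]
  rw [pv_ngrams_eq n hn]

theorem pv_outer (n : Int) (hn : 1 ≤ n) (ws : List (String × Int)) (d : PySem.Dict (List String) Int) :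
    ws.foldl (pvAword n) (pvG n d) = pvG n (ws.foldl (pvBword n) d) := by
  induction ws generalizing d with
  | nil => rfl
  | cons wf t ih =>
      rw [List.foldl_cons, List.foldl_cons, pv_word n hn]
      exact ih _

theorem pv_nodup_bump (f : Int) (l : List (List String))
    (d : PySem.Dict (List String) Int) (h : d.keys.Nodup) :
    (l.foldl (pvBump f) d).keys.Nodup := by
  induction l generalizing d with
  | nil => exact h
  | cons ng t ih => exact ih _ (PySem.Dict.nodup_keys_insert _ _ _ h)

theorem pv_nodup_outer (n : Int) (ws : List (String × Int))
    (d : PySem.Dict (List String) Int) (h : d.keys.Nodup) :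
    (ws.foldl (pvBword n) d).keys.Nodup := by
  induction ws generalizing d with
  | nil => exact h
  | cons wf t ih =>
      refine ih _ ?_
      rw [pv_bword_eq]
      exact pv_nodup_bump wf.2 _ d h

-- B's second pass over the nodup-keyed frequency dict rebuilds exactly pvG
theorem pv_items_out (n : Int) (fr : PySem.Dict (List String) Int) (h : fr.keys.Nodup) :
    (fr.items.foldl (fun out p =>
      out.insert p.1 (PySem.Dict.ofList [("freq", p.2), ("score", n * p.2)])) PySem.Dict.empty)
    = pvG n fr := by
  apply PySem.Dict.ext
  rw [PySem.Dict.items_foldl_insert_fresh fr.items (fun p => p.1)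
    (fun p => PySem.Dict.ofList [("freq", p.2), ("score", n * p.2)]) PySem.Dict.empty
    (fun a _ => rfl) h]
  rfl

-- ===== VERDICT (by name: the statement is the Claim_ definition above) =====
theorem calculate_ngrams_spec : Claim_equal_calculate_ngrams := by
  intro args _ hpre
  show calculate_ngrams args = calculate_ngrams_alt args
  obtain ⟨n, ws⟩ := args
  have hn : 1 ≤ n := hpre
  have h1 := pv_outer n hn (PySem.Dict.ofList ws).items PySem.Dict.empty
  have hnd := pv_nodup_outer n (PySem.Dict.ofList ws).items PySem.Dict.empty
    PySem.Dict.nodup_keys_empty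
  exact congrArg (fun d => d.items.map (fun p => (p.1, p.2.items)))
    (h1.trans (pv_items_out n _ hnd).symm)
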